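-- pv_equiv track=rewrite | github.com/pdsmith90/codesignal | arcade/python/yin_and_yang_of_yields/65.py | calcBonuses
-- ===== SOURCE A (Python) =====
-- def calcBonuses(bonuses, n):
--     it = (x for x in bonuses)
--     res = 0
--
--     try:
--         for _ in range(n):
--             res += next(it)
--     except StopIteration:
--         res = 0
--
--     return res
-- ===== SOURCE B (Python) =====
-- def calcBonuses(bonuses, n):
--     if n <= 0:
--         return 0
--     vals = bonuses[:n]
--     return sum(vals) if len(vals) == n else 0
-- ===== Notes on version B (the rewrite author's own statement) =====
-- stated objective: simpler
-- what changed: Replaces A's generator/next()/StopIteration accumulation loop with a guard on n <= 0 plus slice-the-prefix, check its length, and sum it in one C-level library call.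
import Mathlib
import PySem

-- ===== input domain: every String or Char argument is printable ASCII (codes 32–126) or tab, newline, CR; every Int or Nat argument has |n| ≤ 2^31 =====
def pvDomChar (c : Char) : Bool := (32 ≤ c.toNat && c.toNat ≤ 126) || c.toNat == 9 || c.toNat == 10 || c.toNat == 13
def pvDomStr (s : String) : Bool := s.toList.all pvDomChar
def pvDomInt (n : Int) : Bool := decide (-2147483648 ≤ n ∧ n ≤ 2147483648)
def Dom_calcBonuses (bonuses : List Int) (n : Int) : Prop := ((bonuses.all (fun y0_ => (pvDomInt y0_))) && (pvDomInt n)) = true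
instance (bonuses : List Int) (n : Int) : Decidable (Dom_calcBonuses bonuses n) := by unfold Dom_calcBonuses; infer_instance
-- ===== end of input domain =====

-- B replaces A's generator/next()/StopIteration accumulation with guard + slice-prefix + length check + sum (simpler decomposition).

-- ===== PORT A =====
-- the for-loop over range(n): each step takes next(it); StopIteration (empty iterator) sets res = 0
def calcBonusesLoop (it : List Int) (res : Int) (k : Nat) : Int :=
  match k with
  | 0 => res
  | k + 1 =>
    match it with
    | [] => 0                 -- StopIteration: res = 0
    | x :: rest => calcBonusesLoop rest (res + x) k

def calcBonuses (bonuses : List Int) (n : Int) : Int :=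
  calcBonusesLoop bonuses 0 n.toNat   -- range(n) is empty for n ≤ 0

-- ===== PORT B =====
def calcBonuses_alt (bonuses : List Int) (n : Int) : Int :=
  if n ≤ 0 then 0
  else
    let vals := PySem.List.slice bonuses none (some n)   -- bonuses[:n]
    if (vals.length : Int) = n then vals.sum else 0

-- ===== PRECONDITION & SPEC =====
def Spec_calcBonuses (bonuses : List Int) (n : Int) (out : Int) : Prop := out = calcBonuses_alt bonuses n
instance (bonuses : List Int) (n : Int) (out : Int) : Decidable (Spec_calcBonuses bonuses n out) := by unfold Spec_calcBonuses; infer_instance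

-- ===== CLAIM (what is proved, stated in full; the proofs are below) =====
def Claim_equal_calcBonuses : Prop := ∀ (bonuses : List Int) (n : Int), Dom_calcBonuses bonuses n → Spec_calcBonuses bonuses n (calcBonuses bonuses n)

-- ===== LEMMAS AND PROOFS =====

-- A's loop: if the iterator holds at least k elements, add the sum of the first k; otherwise 0.
theorem calcBonusesLoop_eq (k : Nat) : ∀ (it : List Int) (res : Int),
    calcBonusesLoop it res k = if k ≤ it.length then res + (it.take k).sum else 0 := by
  induction k with
  | zero => intro it res; simp [calcBonusesLoop]
  | succ k ih =>
    intro it res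
    cases it with
    | nil => simp [calcBonusesLoop]
    | cons x rest =>
      simp only [calcBonusesLoop, ih, List.length_cons, List.take_succ_cons, List.sum_cons]
      by_cases h : k ≤ rest.length
      · simp [h, Nat.succ_le_succ h]; ring
      · rw [if_neg h, if_neg (fun hh => h (Nat.le_of_succ_le_succ hh))]


-- ===== VERDICT (by name: the statement is the Claim_ definition above) =====
theorem calcBonuses_spec : Claim_equal_calcBonuses := by
  intro bonuses n _
  unfold Spec_calcBonuses calcBonuses calcBonuses_alt
  rw [calcBonusesLoop_eq]
  by_cases hn : n ≤ 0
  · simp [hn, Int.toNat_of_nonpos hn]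
  · rw [not_le] at hn
    simp only [if_neg (not_le.mpr hn), PySem.List.slice_to bonuses (le_of_lt hn)]
    by_cases h : n.toNat ≤ bonuses.length
    · rw [if_pos h, if_pos]
      · simp
      · rw [List.length_take]; omega
    · rw [if_neg h, if_neg]
      rw [List.length_take]
      intro hc; apply h; omega
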